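-- pv_equiv track=rewrite | github.com/SkabbMask/steamdeck-bg3-ai | utils.py | is_stuck
-- ===== SOURCE A (Python) =====
-- def is_stuck(loop_detect_window, all_actions: list) -> bool:
--     click_actions = [a for a in all_actions if "clicked" in a]
--     if len(click_actions) < loop_detect_window:
--         return False
--     last = click_actions[-loop_detect_window:]
--     try:
--         coords = [a.split("clicked ")[1].split(" -")[0] for a in last]
--         return len(set(coords)) == 1
--     except Exception:
--         return False
-- ===== SOURCE B (Python) =====
-- def is_stuck(loop_detect_window, all_actions: list) -> bool:
--     # Reverse scan with early exit: collect the most recent click actions and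
--     # stop as soon as the window is full, instead of filtering the whole list
--     # and slicing.
--     recent = []
--     for a in reversed(all_actions):
--         if len(recent) >= loop_detect_window:
--             break
--         if "clicked" in a:
--             recent.append(a)
--     if len(recent) < loop_detect_window:
--         return False
--     try:
--         first = recent[0].split("clicked ")[1].split(" -")[0]
--         return all(a.split("clicked ")[1].split(" -")[0] == first for a in recent)
--     except Exception:
--         return False
-- ===== Notes on version B (the rewrite author's own statement) =====
-- stated objective: alternative
-- what changed: B replaces A's filter-the-whole-list-then-negative-slice with a single reverse scan that collects click actions and stops as soon as the window is full, and replaces the len(set(...))==1 cardinality test with a compare-each-coordinate-against-the-first pass.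
-- outside the precondition, e.g. on is_stuck(0, ['clicked 1,2 - btn']): A returns True, B returns False; on is_stuck(-1, ['clicked 1,2 - a', 'clicked 3,4 - b']): A returns True, B returns False; on is_stuck(0, []): A returns False, B returns False
import Mathlib
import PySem

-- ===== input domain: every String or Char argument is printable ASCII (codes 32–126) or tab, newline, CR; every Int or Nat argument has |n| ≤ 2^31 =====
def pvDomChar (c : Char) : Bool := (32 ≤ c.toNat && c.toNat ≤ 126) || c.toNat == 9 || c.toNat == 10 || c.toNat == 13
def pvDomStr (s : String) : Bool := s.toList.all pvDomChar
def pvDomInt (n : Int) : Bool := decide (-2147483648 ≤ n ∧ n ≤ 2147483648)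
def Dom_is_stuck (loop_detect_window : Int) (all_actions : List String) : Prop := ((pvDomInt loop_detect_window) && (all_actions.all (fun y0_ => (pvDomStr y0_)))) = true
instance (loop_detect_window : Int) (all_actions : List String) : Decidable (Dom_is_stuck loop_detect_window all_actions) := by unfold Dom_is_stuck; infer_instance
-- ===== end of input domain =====

-- B replaces A's filter-whole-list-then-slice with a reverse scan that stops as soon as the
-- window is full, and replaces the set-cardinality test by a compare-against-first pass.

-- ===== PORT A =====
-- a.split("clicked ")[1].split(" -")[0]; none exactly where Python raises IndexError
def coordA (a : String) : Option String := do
  let parts ← PySem.Str.split? a "clicked "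
  let t ← PySem.List.pyGet? parts 1
  let parts2 ← PySem.Str.split? t " -"
  PySem.List.pyGet? parts2 0

-- the try-block of A: coords list comprehension (first failure → except → False), len(set(coords)) == 1
def checkLast (last : List String) : Bool :=
  match last.mapM coordA with
  | some coords => (PySem.Set.ofList coords).length == 1
  | none => false

def is_stuck (loop_detect_window : Int) (all_actions : List String) : Bool :=
  let click_actions := all_actions.filter (fun a => PySem.Str.isIn "clicked" a)
  if (click_actions.length : Int) < loop_detect_window then false
  else checkLast (PySem.List.slice click_actions (some (-loop_detect_window)) none)

-- ===== PORT B =====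
def coordB (a : String) : Option String := do
  let parts ← PySem.Str.split? a "clicked "
  let t ← PySem.List.pyGet? parts 1
  let parts2 ← PySem.Str.split? t " -"
  PySem.List.pyGet? parts2 0

-- the reverse for-loop with break: walk the (already reversed) list, appending clicks until full
def collectRecent (w : Int) : List String → List String → List String
  | [], recent => recent
  | a :: rest, recent =>
    if w ≤ (recent.length : Int) then recent
    else if PySem.Str.isIn "clicked" a then collectRecent w rest (recent ++ [a])
    else collectRecent w rest recent

-- all(a.split("clicked ")[1].split(" -")[0] == first for a in recent); an exception → false
def allSameB (first : String) : List String → Bool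
  | [] => true
  | a :: rest =>
    match coordB a with
    | none => false
    | some c => if c == first then allSameB first rest else false

-- the try-block of B: recent[0] on an empty list raises IndexError → except → False
def checkRecent (recent : List String) : Bool :=
  match recent with
  | [] => false
  | r0 :: _ =>
    match coordB r0 with
    | none => false
    | some first => allSameB first recent

def is_stuck_alt (loop_detect_window : Int) (all_actions : List String) : Bool :=
  let recent := collectRecent loop_detect_window all_actions.reverse []
  if (recent.length : Int) < loop_detect_window then false
  else checkRecent recent

-- ===== PRECONDITION & SPEC =====
-- Pre_ restricts to positive window sizes, the task's natural domain ("the last N clicks",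
-- N >= 1): for loop_detect_window <= 0 a Python zero/negative slice start makes A compare the
-- whole click history (or an arbitrary tail of it), an accident of slicing outside the task's
-- meaning, while B's empty window yields False.
def Pre_is_stuck (loop_detect_window : Int) (_all_actions : List String) : Prop :=
  1 ≤ loop_detect_window
instance (loop_detect_window : Int) (all_actions : List String) : Decidable (Pre_is_stuck loop_detect_window all_actions) := by unfold Pre_is_stuck; infer_instance

def pvWitness_is_stuck : Int × List String := (2, ["clicked 5,5 - a", "clicked 5,5 - b"])

def Spec_is_stuck (loop_detect_window : Int) (all_actions : List String) (out : Bool) : Prop := out = is_stuck_alt loop_detect_window all_actions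
instance (loop_detect_window : Int) (all_actions : List String) (out : Bool) : Decidable (Spec_is_stuck loop_detect_window all_actions out) := by unfold Spec_is_stuck; infer_instance

-- ===== CLAIM (what is proved, stated in full; the proofs are below) =====
def Claim_equal_is_stuck : Prop := ∀ (loop_detect_window : Int) (all_actions : List String), Dom_is_stuck loop_detect_window all_actions → Pre_is_stuck loop_detect_window all_actions → Spec_is_stuck loop_detect_window all_actions (is_stuck loop_detect_window all_actions)

-- ===== LEMMAS AND PROOFS =====

theorem coordB_eq : coordB = coordA := rfl

theorem bool_eq_of_iff {a b : Bool} (h : a = true ↔ b = true) : a = b := by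
  cases a <;> cases b <;> simp_all

-- the common value both try-blocks compute
def uniform (l : List String) : Bool :=
  match l with
  | [] => false
  | a0 :: _ =>
    match coordA a0 with
    | none => false
    | some f => l.all (fun a => coordA a == some f)

theorem uniform_iff' (l : List String) :
    uniform l = true ↔ ∃ f, l ≠ [] ∧ ∀ a ∈ l, coordA a = some f := by
  cases l with
  | nil => simp [uniform]
  | cons a0 t =>
    cases h0 : coordA a0 with
    | none =>
      simp only [uniform, h0]
      constructor
      · intro h; simp at h
      · rintro ⟨f, -, hall⟩
        rw [hall a0 (by simp)] at h0; cases h0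
    | some f =>
      simp only [uniform, h0, List.all_eq_true]
      constructor
      · intro hall
        refine ⟨f, by simp, ?_⟩
        intro a ha
        have := hall a ha
        simpa using this
      · rintro ⟨g, -, hall⟩
        have h2 := hall a0 (by simp)
        rw [h0] at h2
        have hg : f = g := by simpa using h2
        intro a ha
        simp [hall a ha, hg]

theorem collect_eq (w : Int) (l acc : List String) :
    collectRecent w l acc =
      acc ++ (l.filter (fun a => PySem.Str.isIn "clicked" a)).take (w.toNat - acc.length) := by
  induction l generalizing acc with
  | nil => simp [collectRecent]
  | cons a rest ih =>
    by_cases hw : w ≤ (acc.length : Int)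
    · have h0 : w.toNat - acc.length = 0 := by omega
      simp [collectRecent, hw, h0]
    · cases hp : PySem.Str.isIn "clicked" a with
      | true =>
        have hstep : collectRecent w (a :: rest) acc = collectRecent w rest (acc ++ [a]) := by
          simp only [collectRecent]
          rw [if_neg hw, if_pos hp]
        rw [hstep, ih]
        have h1 : w.toNat - acc.length = (w.toNat - (acc ++ [a]).length) + 1 := by
          simp only [List.length_append, List.length_cons, List.length_nil]
          omega
        rw [List.filter_cons, if_pos hp, h1, List.take_succ_cons, List.append_assoc]
        rfl
      | false =>
        have hstep : collectRecent w (a :: rest) acc = collectRecent w rest acc := by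
          simp only [collectRecent]
          rw [if_neg hw, if_neg (by rw [hp]; exact Bool.false_ne_true)]
        rw [hstep, ih, List.filter_cons, if_neg (by rw [hp]; exact Bool.false_ne_true)]

theorem allSameB_eq (f : String) (l : List String) :
    allSameB f l = l.all (fun a => coordA a == some f) := by
  induction l with
  | nil => rfl
  | cons a rest ih =>
    simp only [allSameB, coordB_eq, List.all_cons]
    cases h : coordA a with
    | none => simp
    | some c =>
      by_cases hc : c = f
      · simp [hc, ih]
      · simp [hc]

theorem checkRecent_eq_uniform (l : List String) : checkRecent l = uniform l := by
  cases l with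
  | nil => rfl
  | cons a0 t =>
    cases h : coordA a0 with
    | none => simp [checkRecent, uniform, coordB_eq, h]
    | some f => simp [checkRecent, uniform, coordB_eq, h, allSameB_eq]

theorem mapM_coordA_some (l : List String) (h : ∀ a ∈ l, (coordA a).isSome) :
    l.mapM coordA = some (l.filterMap coordA) := by
  induction l with
  | nil => simp
  | cons a t ih =>
    obtain ⟨c, hc⟩ := Option.isSome_iff_exists.mp (h a (by simp))
    have iht := ih (fun x hx => h x (by simp [hx]))
    simp [List.mapM_cons, hc, iht]

theorem mapM_coordA_none (l : List String) (a : String) (ha : a ∈ l) (h : coordA a = none) :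
    l.mapM coordA = none := by
  induction l with
  | nil => cases ha
  | cons b t ih =>
    rcases List.mem_cons.mp ha with rfl | ha'
    · simp [List.mapM_cons, h]
    · cases hb : coordA b <;> simp [List.mapM_cons, hb, ih ha']

theorem nodup_eq_singleton {α : Type} (l : List α) (f : α) (hn : l.Nodup) (hm : ∀ x, x ∈ l ↔ x = f) : l = [f] := by
  cases l with
  | nil => exact absurd ((hm f).mpr rfl) (by simp)
  | cons a t =>
    have ha : a = f := (hm a).mp (by simp)
    subst ha
    cases t with
    | nil => rfl
    | cons b u =>
      have hb : b = a := (hm b).mp (by simp)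
      subst hb
      simp at hn

theorem ofList_length_one_iff (cs : List String) :
    ((PySem.Set.ofList cs).length = 1) ↔ ∃ f, cs ≠ [] ∧ ∀ x ∈ cs, x = f := by
  constructor
  · intro h
    obtain ⟨f, hf⟩ := List.length_eq_one_iff.mp h
    refine ⟨f, ?_, ?_⟩
    · rintro rfl; simp [PySem.Set.ofList_nil] at hf
    · intro x hx
      have hx2 : x ∈ PySem.Set.ofList cs := (PySem.Set.mem_ofList cs x).mpr hx
      rw [hf] at hx2; simpa using hx2
  · rintro ⟨f, hne, hall⟩
    have hfmem : f ∈ cs := by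
      cases cs with
      | nil => exact absurd rfl hne
      | cons c t =>
        have hc : c = f := hall c (by simp)
        rw [← hc]; simp
    have h1 : PySem.Set.ofList cs = [f] := by
      apply nodup_eq_singleton _ f (PySem.Set.nodup_ofList cs)
      intro x
      rw [PySem.Set.mem_ofList]
      constructor
      · exact hall x
      · intro hxf
        rw [hxf]
        exact hfmem
    rw [h1]
    rfl

theorem checkLast_eq_uniform (l : List String) : checkLast l = uniform l := by
  by_cases h : ∀ a ∈ l, (coordA a).isSome
  · rw [checkLast, mapM_coordA_some l h]
    cases l with
    | nil => rfl
    | cons a0 t =>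
      obtain ⟨f, hf⟩ := Option.isSome_iff_exists.mp (h a0 (by simp))
      simp only [uniform, hf]
      apply bool_eq_of_iff
      rw [beq_iff_eq, ofList_length_one_iff, List.all_eq_true]
      constructor
      · rintro ⟨g, hne, hall⟩
        have hfm : f ∈ (a0 :: t).filterMap coordA := List.mem_filterMap.mpr ⟨a0, by simp, hf⟩
        have hgf : f = g := hall f hfm
        intro a ha
        obtain ⟨c, hc⟩ := Option.isSome_iff_exists.mp (h a ha)
        have hcg : c = g := hall c (List.mem_filterMap.mpr ⟨a, ha, hc⟩)
        simp [hc, hcg, hgf]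
      · intro hall
        refine ⟨f, ?_, ?_⟩
        · intro hemp
          have hfm : f ∈ (a0 :: t).filterMap coordA := List.mem_filterMap.mpr ⟨a0, by simp, hf⟩
          rw [hemp] at hfm; cases hfm
        · intro x hx
          obtain ⟨a, ha, hax⟩ := List.mem_filterMap.mp hx
          have h2 := hall a ha
          rw [hax] at h2
          simpa using h2
  · simp only [not_forall] at h
    obtain ⟨a, ha, hna⟩ := h
    have hnone : coordA a = none := Option.not_isSome_iff_eq_none.mp hna
    rw [checkLast, mapM_coordA_none l a ha hnone]
    symm
    cases l with
    | nil => cases ha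
    | cons a0 t =>
      cases h0 : coordA a0 with
      | none => simp [uniform, h0]
      | some f =>
        simp only [uniform, h0]
        refine List.all_eq_false.mpr ⟨a, ha, ?_⟩
        simp [hnone]

theorem uniform_reverse (l : List String) : uniform l.reverse = uniform l := by
  apply bool_eq_of_iff
  rw [uniform_iff', uniform_iff']
  constructor
  · rintro ⟨f, hne, hall⟩
    exact ⟨f, by simpa using hne, fun a ha => hall a (by simpa using ha)⟩
  · rintro ⟨f, hne, hall⟩
    exact ⟨f, by simpa using hne, fun a ha => hall a (by simpa using ha)⟩

theorem main_eq (w : Int) (all : List String) (hw1 : 1 ≤ w) :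
    is_stuck w all = is_stuck_alt w all := by
  have hcollect :
      collectRecent w all.reverse [] =
        ((all.filter (fun a => PySem.Str.isIn "clicked" a)).reverse).take w.toNat := by
    rw [collect_eq]
    simp [List.filter_reverse]
  simp only [is_stuck, is_stuck_alt, hcollect]
  set clicks := all.filter (fun a => PySem.Str.isIn "clicked" a) with hclicks
  by_cases hn : (clicks.length : Int) < w
  · -- fewer clicks than the window: both false
    have hB1 : ((clicks.reverse.take w.toNat : List String).length : Int) < w := by
      simp only [List.length_take, List.length_reverse]
      omega
    rw [if_pos hn, if_pos hB1]
  · have hB1 : ¬ (((clicks.reverse.take w.toNat : List String)).length : Int) < w := by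
      simp only [List.length_take, List.length_reverse]
      omega
    rw [if_neg hn, if_neg hB1]
    have hwn : -w = -((w.toNat : Int)) := by omega
    rw [hwn, PySem.List.slice_from_neg_natCast clicks w.toNat (by omega)]
    rw [List.take_reverse]
    rw [checkRecent_eq_uniform, uniform_reverse, checkLast_eq_uniform]

-- ===== VERDICT (by name: the statement is the Claim_ definition above) =====
theorem is_stuck_spec : Claim_equal_is_stuck := by
  intro w all _ hpre
  exact main_eq w all hpre
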